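-- pv_equiv track=rewrite | github.com/minus9d/programming_contest_archive | event/mujin2018/d/d.py | check
-- ===== SOURCE A (Python) =====
-- def rev(x):
--     return int(''.join(reversed(str(x))))
--
-- cache = [[None for _ in range(1001)] for _ in range(1001)]
--
-- def check(n, m):
--     n, m = min(n, m), max(n, m)
--     if cache[n][m] is not None:
--         return cache[n][m]
--
--     history = set()
--     res = None
--     cnt = 0
--     while True:
--         if (n, m) in history:
--             res = True
--             break
--
--         history.add((n, m))
--         cnt += 1
--
--         if n * m == 0:
--             res = False
--             break
--         n = rev(n)
--         n, m = min(n, m), max(n, m)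
--         m -= n
--         n, m = min(n, m), max(n, m)
--
--         if cache[n][m] is not None:
--             res = cache[n][m]
--             break
--     for h in history:
--         cache[h[0]][h[1]] = res
--
--     return res
-- ===== SOURCE B (Python) =====
-- def rev(x):
--     return int(str(x)[::-1])
--
--
-- def check(n, m):
--     # Pure bounded iteration instead of visited-set cycle detection: the
--     # reachable states are pairs in [0,1000]x[0,1000], so a trajectory that
--     # survives 1001*1001 + 1 steps without hitting a zero product has repeated
--     # a state and therefore cycles forever.
--     a, b = min(n, m), max(n, m)
--     for _ in range(1001 * 1001 + 1):
--         if a * b == 0: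
--             return False
--         r = rev(a)
--         a, b = min(r, b), max(r, b)
--         b -= a
--         a, b = min(a, b), max(a, b)
--     return True
-- ===== Notes on version B (the rewrite author's own statement) =====
-- stated objective: alternative
-- what changed: Replaces the visited-set cycle detection (and the module-level 1001x1001 memo cache A builds and mutates) by a pure constant-memory iteration of the reverse-subtract step with a pigeonhole bound of 1001*1001+1 steps: any trajectory that survives that many steps without a zero product has repeated one of the at most 1001*1001 reachable states and cycles forever.
-- outside the precondition, e.g. on check(-3, 0): A returns False, B returns False
import Mathlib
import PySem

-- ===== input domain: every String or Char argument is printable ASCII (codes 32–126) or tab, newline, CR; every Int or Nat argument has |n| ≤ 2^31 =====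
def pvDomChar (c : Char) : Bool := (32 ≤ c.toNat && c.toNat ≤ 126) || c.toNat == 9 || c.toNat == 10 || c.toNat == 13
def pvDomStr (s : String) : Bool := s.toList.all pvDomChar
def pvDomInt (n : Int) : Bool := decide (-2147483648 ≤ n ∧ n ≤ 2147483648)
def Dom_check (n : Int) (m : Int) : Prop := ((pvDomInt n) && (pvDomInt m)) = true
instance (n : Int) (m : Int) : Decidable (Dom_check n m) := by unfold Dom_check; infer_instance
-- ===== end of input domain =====

set_option maxRecDepth 8000

-- B replaces A's visited-set cycle detection by a pure bounded iteration (pigeonhole bound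
-- 1001*1001+1 over the reachable state box [0,1000]^2); A also mutates a module-level memo
-- cache — the equivalence proved here is about the RETURN value (cold cache; the cache only
-- ever holds the value A would recompute, so warm reads return the same value).

-- ===== PORT A =====
-- rev(x) = int(''.join(reversed(str(x)))); Source B's rev computes the same reversal via str(x)[::-1]
-- and is ported by this same definition (none = Python's ValueError on a negative x).
def rev? (x : Int) : Option Int := PySem.Int.ofChars? (PySem.Int.toChars x).reverse

-- the while-True loop of A; `fuel` only makes the recursion total (proved unreachable under
-- Pre_); the reads of the module-level cache are elided: with a cold cache they always see None.
-- `cnt` is A's dead counter (incremented, never read).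
def checkLoop (fuel : Nat) (history : PySem.Set (Int × Int)) (cnt : Int) (n m : Int) : Bool :=
  match fuel with
  | 0 => true  -- unreachable under Pre_check (the fuel exceeds the number of distinct states)
  | fuel + 1 =>
    if history.contains (n, m) then true
    else
      let history := history.add (n, m)
      let cnt := cnt + 1
      if n * m == 0 then false
      else
        match rev? n with
        | none => false  -- Python raises ValueError here; unreachable under Pre_check
        | some r =>
          let n1 := min r m
          let m1 := max r m
          let m2 := m1 - n1
          checkLoop fuel history cnt (min n1 m2) (max n1 m2)

def check (n : Int) (m : Int) : Bool :=
  checkLoop 1002002 PySem.Set.empty 0 (min n m) (max n m)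

-- ===== PORT B =====
-- the for _ in range(1001*1001+1) loop of Source B, structural recursion on the remaining count
def checkAltLoop : Nat → Int → Int → Bool
  | 0, _, _ => true
  | f + 1, a, b =>
    if a * b == 0 then false
    else
      match rev? a with
      | none => true  -- Python raises ValueError here; unreachable under Pre_check
      | some r =>
        let a1 := min r b
        let b1 := max r b
        let b2 := b1 - a1
        checkAltLoop f (min a1 b2) (max a1 b2)

def check_alt (n : Int) (m : Int) : Bool :=
  checkAltLoop 1002002 (min n m) (max n m)

-- ===== PRECONDITION & SPEC =====
-- Pre_check: A indexes a 1001×1001 module cache and reverses decimal strings, so outside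
-- [0,1000]^2 it raises IndexError (arguments above 1000 / below the negative wrap bound) or
-- ValueError (rev of a negative value); the few excluded inputs on which A still returns
-- (a negative argument paired with 0, where the product is 0 at once and A returns False)
-- are cut off by the same rectangular bounds.
def Pre_check (n : Int) (m : Int) : Prop :=
  0 ≤ n ∧ n ≤ 1000 ∧ 0 ≤ m ∧ m ≤ 1000
instance (n : Int) (m : Int) : Decidable (Pre_check n m) := by unfold Pre_check; infer_instance

def pvWitness_check : Int × Int := (12, 38)

def Spec_check (n : Int) (m : Int) (out : Bool) : Prop := out = check_alt n m
instance (n : Int) (m : Int) (out : Bool) : Decidable (Spec_check n m out) := by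
  unfold Spec_check; infer_instance

-- ===== CLAIM (what is proved, stated in full; the proofs are below) =====
def Claim_equal_check : Prop :=
  ∀ (n : Int) (m : Int), Dom_check n m → Pre_check n m → Spec_check n m (check n m)

-- ===== LEMMAS AND PROOFS =====

-- the shared one-step transition (identity on terminal states), and the trajectory
def pvStep (s : Int × Int) : Int × Int :=
  if s.1 * s.2 = 0 then s
  else
    match rev? s.1 with
    | none => s
    | some r =>
      let x := min r s.2
      let y := max r s.2
      let y2 := y - x
      (min x y2, max x y2)

def pvTraj (s : Int × Int) (k : Nat) : Int × Int := pvStep^[k] s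

def pvBox (s : Int × Int) : Prop := 0 ≤ s.1 ∧ s.1 ≤ s.2 ∧ s.2 ≤ 1000

set_option maxRecDepth 8000 in
theorem rev_ok_nat : ∀ k : Nat, k < 1000 →
    ((rev? ((k : Int) + 1)).elim false fun r => decide (0 ≤ r ∧ r ≤ 1000)) = true := by decide

theorem rev_bound {a : Int} (h1 : 1 ≤ a) (h2 : a ≤ 1000) :
    ∃ r, rev? a = some r ∧ 0 ≤ r ∧ r ≤ 1000 := by
  have hk := rev_ok_nat (a - 1).toNat (by omega)
  have he : (((a - 1).toNat : Int) + 1) = a := by omega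
  rw [he] at hk
  cases h : rev? a with
  | none => rw [h] at hk; simp at hk
  | some r => rw [h] at hk; simp at hk; exact ⟨r, rfl, hk⟩

theorem traj_succ (s : Int × Int) (k : Nat) :
    pvTraj s (k + 1) = pvStep (pvTraj s k) := Function.iterate_succ_apply' pvStep k s

theorem step_eq {s : Int × Int} (hnt : ¬ s.1 * s.2 = 0) {r : Int} (hr : rev? s.1 = some r) :
    pvStep s = (min (min r s.2) (max r s.2 - min r s.2),
                max (min r s.2) (max r s.2 - min r s.2)) := by
  simp [pvStep, hnt, hr]

theorem step_box {s : Int × Int} (hb : pvBox s) : pvBox (pvStep s) := by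
  by_cases hnt : s.1 * s.2 = 0
  · simpa [pvStep, hnt] using hb
  · have h1 : 1 ≤ s.1 := by
      rcases hb with ⟨h0, hle, hm⟩
      rcases lt_or_eq_of_le h0 with h | h
      · omega
      · exact absurd (by rw [← h]; ring) hnt
    obtain ⟨r, hr, hr0, hr1⟩ := rev_bound h1 (by rcases hb with ⟨_, hle, hm⟩; omega)
    rw [step_eq hnt hr]
    rcases hb with ⟨h0, hle, hm⟩
    unfold pvBox
    refine ⟨?_, ?_, ?_⟩ <;> dsimp only <;> omega

theorem traj_box {s : Int × Int} (hb : pvBox s) (k : Nat) : pvBox (pvTraj s k) := by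
  induction k with
  | zero => exact hb
  | succ k ih => rw [traj_succ]; exact step_box ih

theorem traj_shift (s : Int × Int) (a b d : Nat) (h : pvTraj s a = pvTraj s b) :
    pvTraj s (a + d) = pvTraj s (b + d) := by
  have ha : pvTraj s (a + d) = pvStep^[d] (pvTraj s a) := by
    rw [pvTraj, Nat.add_comm, Function.iterate_add_apply]; rfl
  have hb : pvTraj s (b + d) = pvStep^[d] (pvTraj s b) := by
    rw [pvTraj, Nat.add_comm, Function.iterate_add_apply]; rfl
  rw [ha, hb, h]

-- a repeat before any terminal state means the trajectory never reaches a terminal state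
theorem no_term_of_cycle {s : Int × Int} {i j : Nat} (hij : i < j)
    (h : pvTraj s i = pvTraj s j)
    (hnt : ∀ t, t < j → ¬ (pvTraj s t).1 * (pvTraj s t).2 = 0) :
    ∀ k, ¬ (pvTraj s k).1 * (pvTraj s k).2 = 0 := by
  intro k
  induction k using Nat.strong_induction_on with
  | _ k ih =>
    by_cases hk : k < j
    · exact hnt k hk
    · have h1 : pvTraj s (i + (k - j)) = pvTraj s (j + (k - j)) := traj_shift s i j _ h
      have h2 : j + (k - j) = k := by omega
      rw [h2] at h1
      rw [← h1]
      exact ih _ (by omega)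

-- pigeonhole: at most 1001*1001 pairwise distinct trajectory states fit in the box
theorem distinct_le {s : Int × Int} (hb : pvBox s) (k : Nat)
    (hd : ∀ i j, i < j → j < k → pvTraj s i ≠ pvTraj s j) : k ≤ 1002001 := by
  have h := Finset.card_le_card_of_injOn
    (f := fun i => (pvTraj s i).1.toNat * 1001 + (pvTraj s i).2.toNat)
    (s := Finset.range k) (t := Finset.range 1002001) ?_ ?_
  · simpa [Finset.card_range] using h
  · intro i _
    obtain ⟨h0, hle, hm⟩ := traj_box hb i
    dsimp only
    simp only [Finset.coe_range, Set.mem_Iio]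
    omega
  · intro i hi j hj hij
    dsimp only at hij
    simp only [Finset.coe_range, Set.mem_Iio] at hi hj
    by_contra hne
    obtain ⟨h0i, hlei, hmi⟩ := traj_box hb i
    obtain ⟨h0j, hlej, hmj⟩ := traj_box hb j
    have heq : pvTraj s i = pvTraj s j := by
      have e1 : (pvTraj s i).1 = (pvTraj s j).1 := by omega
      have e2 : (pvTraj s i).2 = (pvTraj s j).2 := by omega
      exact Prod.ext e1 e2
    rcases Nat.lt_or_ge i j with h | h
    · exact hd i j h hj heq
    · have hji : j < i := by omega
      exact hd j i hji hi heq.symm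

-- B's loop returns false exactly when a terminal state occurs within `f` steps
theorem altLoop_iff (f : Nat) (s : Int × Int) (hb : pvBox s) :
    checkAltLoop f s.1 s.2 = false ↔ ∃ j, j < f ∧ (pvTraj s j).1 * (pvTraj s j).2 = 0 := by
  induction f generalizing s with
  | zero => simp [checkAltLoop]
  | succ f ih =>
    by_cases ht : s.1 * s.2 = 0
    · simp only [checkAltLoop, ht]
      constructor
      · intro _; exact ⟨0, by omega, ht⟩
      · intro _; simp
    · have h1 : 1 ≤ s.1 := by
        rcases hb with ⟨h0, hle, hm⟩
        rcases lt_or_eq_of_le h0 with h | h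
        · omega
        · exact absurd (by rw [← h]; ring) ht
      obtain ⟨r, hr, hr0, hr1⟩ := rev_bound h1 (by rcases hb with ⟨_, hle, hm⟩; omega)
      have hstep : pvStep s = (min (min r s.2) (max r s.2 - min r s.2),
          max (min r s.2) (max r s.2 - min r s.2)) := step_eq ht hr
      have hrec : checkAltLoop (f + 1) s.1 s.2 = checkAltLoop f (pvStep s).1 (pvStep s).2 := by
        simp only [checkAltLoop, hr, hstep]
        simp [ht]
      rw [hrec, ih (pvStep s) (step_box hb)]
      constructor
      · rintro ⟨j, hj, hterm⟩
        refine ⟨j + 1, by omega, ?_⟩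
        rw [pvTraj, Function.iterate_succ_apply]
        exact hterm
      · rintro ⟨j, hj, hterm⟩
        cases j with
        | zero => exact absurd hterm ht
        | succ j =>
          refine ⟨j, by omega, ?_⟩
          rw [pvTraj] at hterm ⊢
          rw [Function.iterate_succ_apply] at hterm
          exact hterm

-- A's loop, under its invariant, computes exactly B's answer
theorem checkLoop_eq (x0 : Int × Int) (hb0 : pvBox x0) :
    ∀ (fuel : Nat) (k : Nat) (hist : PySem.Set (Int × Int)) (cnt : Int),
      fuel + k = 1002002 →
      (∀ t, t ∈ hist ↔ ∃ j, j < k ∧ pvTraj x0 j = t) →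
      (∀ i j, i < j → j < k → pvTraj x0 i ≠ pvTraj x0 j) →
      (∀ t, t < k → ¬ (pvTraj x0 t).1 * (pvTraj x0 t).2 = 0) →
      checkLoop fuel hist cnt (pvTraj x0 k).1 (pvTraj x0 k).2
        = checkAltLoop 1002002 x0.1 x0.2 := by
  intro fuel
  induction fuel with
  | zero =>
    intro k hist cnt hk _ hd _
    exfalso
    have := distinct_le hb0 k hd
    omega
  | succ fuel ih =>
    intro k hist cnt hk hmem hd hnt
    set s := pvTraj x0 k with hs
    have hbs : pvBox s := traj_box hb0 k
    by_cases hin : s ∈ hist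
    · -- repeat: a cycle with no terminal state seen; both sides return true
      obtain ⟨j, hj, hjeq⟩ := (hmem s).1 hin
      have hnever := no_term_of_cycle hj hjeq hnt
      have hBtrue : checkAltLoop 1002002 x0.1 x0.2 = true := by
        cases hB : checkAltLoop 1002002 x0.1 x0.2 with
        | true => rfl
        | false =>
          obtain ⟨t, _, hterm⟩ := (altLoop_iff 1002002 x0 hb0).1 hB
          exact absurd hterm (hnever t)
      have hcd : hist.contains (s.1, s.2) = true := by
        rw [PySem.Set.contains_iff]; exact hin
      have hA : checkLoop (fuel + 1) hist cnt s.1 s.2 = true := by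
        simp only [checkLoop]
        rw [hcd]
        simp
      rw [hA, hBtrue]
    · have hcd : hist.contains (s.1, s.2) = false := by
        rw [← Bool.not_eq_true, PySem.Set.contains_iff]
        exact hin
      by_cases hterm : s.1 * s.2 = 0
      · -- terminal found at step k < 1002002: both sides return false
        have hA : checkLoop (fuel + 1) hist cnt s.1 s.2 = false := by
          simp only [checkLoop]
          rw [hcd]
          simp [hterm]
        rw [hA]
        have : checkAltLoop 1002002 x0.1 x0.2 = false := by
          rw [altLoop_iff 1002002 x0 hb0]
          exact ⟨k, by omega, hterm⟩
        rw [this]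
      · -- step: recurse with the grown history
        have h1 : 1 ≤ s.1 := by
          rcases hbs with ⟨h0, hle, hm⟩
          rcases lt_or_eq_of_le h0 with h | h
          · omega
          · exact absurd (by rw [← h]; ring) hterm
        obtain ⟨r, hr, hr0, hr1⟩ := rev_bound h1 (by rcases hbs with ⟨_, hle, hm⟩; omega)
        have hstep : pvStep s = (min (min r s.2) (max r s.2 - min r s.2),
            max (min r s.2) (max r s.2 - min r s.2)) := step_eq hterm hr
        have hnext : pvTraj x0 (k + 1) = pvStep s := by rw [traj_succ, hs]
        have hA : checkLoop (fuel + 1) hist cnt s.1 s.2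
            = checkLoop fuel (hist.add (s.1, s.2)) (cnt + 1) (pvStep s).1 (pvStep s).2 := by
          simp only [checkLoop]
          rw [hcd, hr, hstep]
          simp [hterm]
        rw [hA, ← hnext]
        refine ih (k + 1) (hist.add (s.1, s.2)) (cnt + 1) (by omega) ?_ ?_ ?_
        · intro t
          rw [PySem.Set.mem_add, hmem t]
          constructor
          · rintro (⟨j, hj, hje⟩ | hts)
            · exact ⟨j, by omega, hje⟩
            · refine ⟨k, by omega, ?_⟩
              rw [hts]
          · rintro ⟨j, hj, hje⟩
            by_cases hjk : j < k
            · exact Or.inl ⟨j, hjk, hje⟩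
            · have hjk' : j = k := by omega
              right
              rw [← hje, hjk']
        · intro i j2 hij hjk1
          by_cases hjk : j2 < k
          · exact hd i j2 hij hjk
          · have hj : j2 = k := by omega
            subst hj
            intro heq
            apply hin
            refine (hmem s).2 ⟨i, by omega, ?_⟩
            rw [heq]
        · intro t ht1
          by_cases htk : t < k
          · exact hnt t htk
          · have : t = k := by omega
            rw [this, ← hs]
            exact hterm

-- ===== VERDICT (by name: the statement is the Claim_ definition above) =====
theorem check_spec : Claim_equal_check := by
  intro n m _ hpre
  unfold Spec_check check check_alt
  obtain ⟨hn0, hn1, hm0, hm1⟩ := hpre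
  have hb0 : pvBox (min n m, max n m) := by
    exact ⟨le_min hn0 hm0, min_le_max, max_le hn1 hm1⟩
  have h := checkLoop_eq (min n m, max n m) hb0 1002002 0 PySem.Set.empty 0
    (by omega)
    (by intro t; simp [PySem.Set.empty])
    (by intro i j _ h; omega)
    (by intro t h; omega)
  simpa [pvTraj] using h
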